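-- pv_equiv track=rewrite | github.com/Swaraj1998/reg-test | scripts/bitmod_init.py | icap_ecc
-- ===== SOURCE A (Python) =====
-- def icap_ecc(idx, data, ecc):
--     off = idx * 32;
--
--     if idx > 0x25:	# avoid 0x800
--         off += 0x1360
--     elif idx > 0x6:	# avoid 0x400
--         off += 0x1340
--     else:		# avoid lower
--         off += 0x1320
--
--     if idx == 0x32:	# mask ECC
--         data &= 0xFFFFE000
--
--     for i in range(32):
--         if (data & 1) == 1:
--             ecc ^= off + i
--         data >>= 1
--
--     if idx == 0x64:	# last index
--         v = ecc & 0xFFF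
--         v ^= v >> 8
--         v ^= v >> 4
--         v ^= v >> 2
--         v ^= v >> 1
--         ecc ^= (v & 1) << 12
--
--     return ecc
-- ===== SOURCE B (Python) =====
-- def _off(idx):
--     return idx * 32 + 0x1320 + 0x20 * ((idx > 0x6) + (idx > 0x25))
--
-- def _word(idx, data):
--     return (data & 0xFFFFE000 if idx == 0x32 else data) & 0xFFFFFFFF
--
-- def _parity12(x):
--     p = 0
--     for b in range(12):
--         p ^= (x >> b) & 1
--     return p
--
-- def icap_ecc(idx, data, ecc):
--     off = _off(idx)
--     w = _word(idx, data)
--     while w:                       # visit only the set bits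
--         rest = w & (w - 1)         # clear lowest set bit
--         ecc ^= off + (w ^ rest).bit_length() - 1
--         w = rest
--     if idx == 0x64:                # last index
--         ecc ^= _parity12(ecc) << 12
--     return ecc
-- ===== Notes on version B (the rewrite author's own statement) =====
-- stated objective: alternative
-- what changed: Replaces the if/elif offset chain with one arithmetic formula, the fixed 32-iteration shift-and-test scan with a sparse loop that visits only the set bits of the 32-bit masked data word (clear lowest set bit via w & (w-1), position via bit_length), and the halving XOR fold of the final 12-bit parity with a direct per-bit parity loop.
import Mathlib
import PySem

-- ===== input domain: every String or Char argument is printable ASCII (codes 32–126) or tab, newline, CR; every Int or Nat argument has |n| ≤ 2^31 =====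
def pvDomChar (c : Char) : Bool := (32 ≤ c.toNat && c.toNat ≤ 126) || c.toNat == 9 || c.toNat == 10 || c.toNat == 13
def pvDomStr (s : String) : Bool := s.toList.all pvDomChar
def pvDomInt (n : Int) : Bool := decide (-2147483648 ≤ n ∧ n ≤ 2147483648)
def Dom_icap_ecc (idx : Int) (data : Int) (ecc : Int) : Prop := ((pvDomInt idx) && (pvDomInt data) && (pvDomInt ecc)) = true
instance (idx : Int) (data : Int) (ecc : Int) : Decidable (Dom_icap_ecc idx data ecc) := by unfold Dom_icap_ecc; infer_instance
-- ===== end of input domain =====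

-- B restructures A: an arithmetic offset formula instead of the if/elif chain, a loop over only the
-- set bits of the 32-bit masked data word instead of the fixed 32-iteration shift scan, and a plain
-- 12-bit parity loop instead of the halving XOR fold; return values are equal.

-- ===== PORT A =====
-- body of A's `for i in range(32)` loop: state is (data, ecc); ecc is updated from the
-- current data, then data >>= 1
def pvAStep (off : Int) (s : Int × Int) (i : Int) : Int × Int :=
  (s.1 >>> (1 : Nat), if PySem.Int.band s.1 1 = 1 then PySem.Int.bxor s.2 (off + i) else s.2)

def icap_ecc (idx : Int) (data : Int) (ecc : Int) : Int :=
  let off := idx * 32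
  let off := if 0x25 < idx then off + 0x1360
    else if 0x6 < idx then off + 0x1340
    else off + 0x1320
  let data := if idx = 0x32 then PySem.Int.band data 0xFFFFE000 else data
  let ecc := ((PySem.List.pyRange 0 32).foldl (pvAStep off) (data, ecc)).2
  if idx = 0x64 then
    let v := PySem.Int.band ecc 0xFFF
    let v := PySem.Int.bxor v (v >>> (8 : Nat))
    let v := PySem.Int.bxor v (v >>> (4 : Nat))
    let v := PySem.Int.bxor v (v >>> (2 : Nat))
    let v := PySem.Int.bxor v (v >>> (1 : Nat))
    PySem.Int.bxor ecc (PySem.Int.band v 1 <<< (12 : Nat))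
  else ecc

-- ===== PORT B =====
-- Source B's `_off`: the offset as one arithmetic formula (bool coerces to 0/1 in Python)
def pvOff (idx : Int) : Int :=
  idx * 32 + 0x1320 + 0x20 * ((if 0x6 < idx then (1 : Int) else 0) + (if 0x25 < idx then (1 : Int) else 0))

-- Source B's `_word`: the 32-bit data word the loop reads (nonnegative after `& 0xFFFFFFFF`)
def pvWord (idx : Int) (data : Int) : Int :=
  PySem.Int.band (if idx = 0x32 then PySem.Int.band data 0xFFFFE000 else data) 0xFFFFFFFF

-- Source B's `_parity12`: XOR of the low 12 bits; pvBit x k is Source B's `(x >> b) & 1`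
def pvBit (x : Int) (k : Nat) : Int := PySem.Int.band (x >>> k) 1

def pvParity12 (x : Int) : Int :=
  (PySem.List.pyRange 0 12).foldl (fun p b => PySem.Int.bxor p (pvBit x b.toNat)) 0

-- Source B's `while w:` loop over the set bits of the (nonnegative) data word:
-- rest = w & (w - 1) clears the lowest set bit, whose position is (w ^ rest).bit_length() - 1
def pvBLoop (off : Int) (w : Nat) (ecc : Int) : Int :=
  if _h : w = 0 then ecc
  else
    let rest := w &&& (w - 1)
    pvBLoop off rest
      (PySem.Int.bxor ecc (off + ((PySem.Int.bitLength ((w ^^^ rest : Nat) : Int) : Int) - 1)))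
termination_by w
decreasing_by
  have h1 : w &&& (w - 1) ≤ w - 1 := Nat.and_le_right
  omega

def icap_ecc_alt (idx : Int) (data : Int) (ecc : Int) : Int :=
  -- the word is nonnegative, so .toNat is exact
  let e := pvBLoop (pvOff idx) (pvWord idx data).toNat ecc
  if idx = 0x64 then PySem.Int.bxor e (pvParity12 e <<< (12 : Nat)) else e

-- ===== PRECONDITION & SPEC =====
def Spec_icap_ecc (idx : Int) (data : Int) (ecc : Int) (out : Int) : Prop := out = icap_ecc_alt idx data ecc
instance (idx : Int) (data : Int) (ecc : Int) (out : Int) : Decidable (Spec_icap_ecc idx data ecc out) := by unfold Spec_icap_ecc; infer_instance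

-- ===== CLAIM (what is proved, stated in full; the proofs are below) =====
def Claim_equal_icap_ecc : Prop := ∀ (idx : Int) (data : Int) (ecc : Int), Dom_icap_ecc idx data ecc → Spec_icap_ecc idx data ecc (icap_ecc idx data ecc)

-- ===== LEMMAS AND PROOFS =====

-- A's loop over Nat data: same 32-step structure, reading the bits of the Nat m
def pvNatA (off : Int) : Nat → Int → Nat → Int → Int
  | 0, _, _, e => e
  | k+1, j, m, e => pvNatA off k (j+1) (m/2) (if m % 2 = 1 then PySem.Int.bxor e (off + j) else e)

lemma pv_shift_emod (d : Int) (k : Nat) :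
    ((d >>> (1 : Nat)) % ((2:Int)^k)).toNat = (d % ((2:Int)^(k+1))).toNat / 2 := by
  rw [Int.shiftRight_eq_div_pow]
  norm_num
  have hP : (0:Int) < 2^k := by positivity
  have h2P : ((2:Int)^(k+1)) = 2 * 2^k := by ring
  set P := (2:Int)^k with hPdef
  set r := d % (2*P) with hr
  have hr0 : 0 ≤ r := Int.emod_nonneg d (by positivity)
  have hrlt : r < 2*P := Int.emod_lt_of_pos d (by positivity)
  have hdq : d = r + (P * (d / (2*P))) * 2 := by
    have h := Int.emod_add_mul_ediv d (2*P)
    rw [← hr] at h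
    linarith
  have hdiv2 : d / 2 = r / 2 + P * (d / (2*P)) := by
    conv_lhs => rw [hdq]
    rw [Int.add_mul_ediv_right _ _ (by norm_num : (2:Int) ≠ 0)]
  have hmod : (d / 2) % P = r / 2 := by
    rw [hdiv2, Int.add_mul_emod_self_left]
    exact Int.emod_eq_of_lt (by omega) (by omega)
  rw [h2P, ← hr, hmod]
  omega

lemma pv_band1_emod (d : Int) (k : Nat) :
    PySem.Int.band d 1 = (d % ((2:Int)^(k+1))) % 2 := by
  rw [PySem.Int.band_one, PySem.Int.mod_eq_emod_of_pos (by norm_num : (0:Int) < 2)]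
  exact (Int.emod_emod_of_dvd d ⟨2^k, by ring⟩).symm

lemma pvA_loop_eq_natA (off : Int) (k : Nat) :
    ∀ (j d e : Int), ((PySem.List.pyRange j (j + (k : Int))).foldl (pvAStep off) (d, e)).2
      = pvNatA off k j ((d % ((2:Int)^k)).toNat) e := by
  induction k with
  | zero =>
    intro j d e
    rw [show j + ((0:Nat) : Int) = j by simp,
      PySem.List.pyRange_one_eq_nil (le_refl j)]
    rfl
  | succ k ih =>
    intro j d e
    have hlt : j < j + ((k+1 : Nat) : Int) := by push_cast; omega
    rw [PySem.List.pyRange_one_cons hlt, List.foldl_cons]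
    simp only [pvAStep]
    have harg : j + ((k+1 : Nat) : Int) = (j+1) + ((k : Nat) : Int) := by push_cast; ring
    rw [harg, ih (j+1) _ _, pv_shift_emod d k]
    simp only [pvNatA]
    have hiff : (PySem.Int.band d 1 = 1) ↔ ((d % ((2:Int)^(k+1))).toNat % 2 = 1) := by
      rw [pv_band1_emod d k]
      have hr0 : 0 ≤ d % ((2:Int)^(k+1)) := Int.emod_nonneg d (by positivity)
      set r := d % ((2:Int)^(k+1)) with hrdef
      omega
    simp only [hiff]

lemma pv_clear_lowbit (q t : Nat) :
    (2^(t+1)*q + 2^t) &&& (2^(t+1)*q + 2^t - 1) = 2^(t+1)*q := by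
  have h1t : (1:Nat) ≤ 2^t := Nat.one_le_two_pow
  have h1 : 2^(t+1)*q + 2^t - 1 = 2^(t+1)*q + (2^t - 1) := by omega
  have hb1 : (2:Nat)^t < 2^(t+1) := by
    have h2 : (2:Nat)^(t+1) = 2*2^t := by ring
    omega
  have hb2 : (2:Nat)^t - 1 < 2^(t+1) := by omega
  have hb0 : (0:Nat) < 2^(t+1) := by positivity
  apply Nat.eq_of_testBit_eq
  intro j
  rw [Nat.testBit_and, h1, Nat.testBit_two_pow_mul_add q hb1 j,
    Nat.testBit_two_pow_mul_add q hb2 j,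
    show (2:Nat)^(t+1)*q = 2^(t+1)*q + 0 by omega,
    Nat.testBit_two_pow_mul_add q hb0 j]
  split_ifs with h
  · rw [Nat.testBit_two_pow, Nat.testBit_two_pow_sub_one]
    simp only [Nat.zero_testBit, Bool.and_eq_false_iff, decide_eq_false_iff_not]
    omega
  · exact Bool.and_self _

lemma pv_xor_lowbit (q t : Nat) :
    (2^(t+1)*q + 2^t) ^^^ (2^(t+1)*q) = 2^t := by
  have hb1 : (2:Nat)^t < 2^(t+1) := by
    have : (2:Nat)^(t+1) = 2*2^t := by ring
    have := Nat.one_le_two_pow (n := t); omega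
  have hb0 : (0:Nat) < 2^(t+1) := by positivity
  apply Nat.eq_of_testBit_eq
  intro j
  rw [Nat.testBit_xor, Nat.testBit_two_pow_mul_add q hb1 j,
    show (2:Nat)^(t+1)*q = 2^(t+1)*q + 0 by omega,
    Nat.testBit_two_pow_mul_add q hb0 j]
  split_ifs with h
  · rw [Nat.zero_testBit, Bool.xor_false]
  · rw [Bool.xor_self, Nat.testBit_two_pow]
    symm
    simp only [decide_eq_false_iff_not]
    omega

lemma pv_bitLength_two_pow (t : Nat) :
    PySem.Int.bitLength (((2:Nat)^t : Nat) : Int) = t + 1 := by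
  have hne : (((2:Nat)^t : Nat) : Int) ≠ 0 := by positivity
  have h1 := PySem.Int.lt_two_pow_bitLength (((2:Nat)^t : Nat) : Int)
  have h2 := PySem.Int.two_pow_bitLength_le (((2:Nat)^t : Nat) : Int) hne
  rw [Int.natAbs_natCast] at h1 h2
  have ht1 : t < PySem.Int.bitLength (((2:Nat)^t : Nat) : Int) :=
    (Nat.pow_lt_pow_iff_right (by norm_num)).mp h1
  have ht2 : PySem.Int.bitLength (((2:Nat)^t : Nat) : Int) - 1 ≤ t :=
    (Nat.pow_le_pow_iff_right (by norm_num)).mp h2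
  omega

lemma pvNatA_eq_bloop (off : Int) :
    ∀ (k t d : Nat) (e : Int), d < 2^k →
      pvNatA off k ((t : Nat) : Int) d e = pvBLoop off (d <<< t) e := by
  intro k
  induction k with
  | zero =>
    intro t d e hd
    have hd0 : d = 0 := by omega
    subst hd0
    rw [Nat.zero_shiftLeft, pvBLoop]
    rfl
  | succ k ih =>
    intro t d e hd
    have hstep : pvNatA off (k+1) ((t : Nat) : Int) d e
        = pvNatA off k (((t : Nat) : Int)+1) (d/2)
            (if d % 2 = 1 then PySem.Int.bxor e (off + ((t : Nat) : Int)) else e) := rfl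
    have hcast : (((t : Nat) : Int)+1) = (((t+1 : Nat)) : Int) := by push_cast; ring
    have hd2 : d / 2 < 2^k := by
      have : (2:Nat)^(k+1) = 2*2^k := by ring
      omega
    rw [hstep, hcast, ih (t+1) (d/2) _ hd2]
    by_cases hpar : d % 2 = 1
    · -- odd: this step XORs off + t; B's loop clears the lowest set bit, at position t
      set q := d / 2 with hq
      have hdq : d = 2*q + 1 := by omega
      have hn : d <<< t = 2^(t+1)*q + 2^t := by rw [Nat.shiftLeft_eq, hdq]; ring
      have hq' : q <<< (t+1) = 2^(t+1)*q := by rw [Nat.shiftLeft_eq]; ring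
      have hne : d <<< t ≠ 0 := by
        have : (1:Nat) ≤ 2^t := Nat.one_le_two_pow
        omega
      conv_rhs => rw [pvBLoop]
      rw [dif_neg hne]
      simp only [hn, pv_clear_lowbit q t, pv_xor_lowbit q t, pv_bitLength_two_pow t, hq']
      rw [if_pos hpar]
      push_cast
      ring_nf
    · -- even: no XOR this step; the shifted words coincide
      have hpar0 : d % 2 = 0 := by omega
      rw [if_neg hpar]
      congr 1
      rw [Nat.shiftLeft_eq, Nat.shiftLeft_eq]
      have h2 : 2 * (d / 2) = d := by omega
      calc d / 2 * 2^(t+1) = (2 * (d / 2)) * 2^t := by ring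
        _ = d * 2^t := by rw [h2]

lemma pv_band_mask (d : Int) : PySem.Int.band d 4294967295 = d % 4294967296 := by
  have hN : ∀ x : Nat, x &&& 4294967295 = x % 4294967296 := by
    intro x
    have h := Nat.and_two_pow_sub_one_eq_mod x 32
    norm_num at h
    exact h
  simp only [PySem.Int.band]
  rw [show Int.toNat 4294967295 = 4294967295 from rfl]
  split_ifs with hd hm hm
  · rw [hN]
    omega
  · norm_num at hm
  · rw [Nat.and_comm, hN]
    omega
  · norm_num at hm

-- the two main loops agree for every starting data word and accumulator
lemma pv_loop_eq (off d e : Int) :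
    ((PySem.List.pyRange 0 32).foldl (pvAStep off) (d, e)).2
      = pvBLoop off (PySem.Int.band d 4294967295).toNat e := by
  have h1 := pvA_loop_eq_natA off 32 0 d e
  rw [show (0:Int) + ((32:Nat) : Int) = 32 by norm_num] at h1
  have hlt : (d % ((2:Int)^32)).toNat < 2^32 := by
    have ha := Int.emod_nonneg d (show ((2:Int)^32) ≠ 0 by norm_num)
    have hb := Int.emod_lt_of_pos d (show (0:Int) < (2:Int)^32 by norm_num)
    norm_num at hb ⊢
    omega
  have h2 := pvNatA_eq_bloop off 32 0 ((d % ((2:Int)^32)).toNat) e hlt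
  rw [Nat.shiftLeft_zero] at h2
  rw [show (((0:Nat)) : Int) = (0:Int) by simp] at h2
  rw [h1, h2, pv_band_mask d]
  norm_num

-- A's if/elif offset equals B's arithmetic formula
lemma pv_off_eq (idx : Int) :
    (if 0x25 < idx then idx * 32 + 0x1360
      else if 0x6 < idx then idx * 32 + 0x1340
      else idx * 32 + 0x1320) = pvOff idx := by
  unfold pvOff
  split_ifs <;> omega

lemma pv_band_mask12 (d : Int) : PySem.Int.band d 4095 = d % 4096 := by
  have hN : ∀ x : Nat, x &&& 4095 = x % 4096 := by
    intro x
    have h := Nat.and_two_pow_sub_one_eq_mod x 12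
    norm_num at h
    exact h
  simp only [PySem.Int.band]
  rw [show Int.toNat 4095 = 4095 from rfl]
  split_ifs with hd hm hm
  · rw [hN]
    omega
  · norm_num at hm
  · rw [Nat.and_comm, hN]
    omega
  · norm_num at hm

-- (x / P) % 2 only depends on x mod 2P
lemma pv_div_mod2_of_emod (d e P : Int) (hP : 0 < P) (h : d % (2*P) = e % (2*P)) :
    (d / P) % 2 = (e / P) % 2 := by
  have key : ∀ x : Int, (x / P) % 2 = (x % (2*P)) / P := by
    intro x
    have hr0 : 0 ≤ x % (2*P) := Int.emod_nonneg x (by positivity)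
    have hrlt : x % (2*P) < 2*P := Int.emod_lt_of_pos x (by positivity)
    have hdq : x = x % (2*P) + (x / (2*P) * 2) * P := by
      have h := Int.emod_add_mul_ediv x (2*P)
      linarith
    have hdiv : x / P = (x % (2*P)) / P + x / (2*P) * 2 := by
      conv_lhs => rw [hdq]
      rw [Int.add_mul_ediv_right _ _ (by positivity : P ≠ 0)]
    have h0 : 0 ≤ (x % (2*P)) / P := Int.ediv_nonneg hr0 (by positivity)
    have h2 : (x % (2*P)) / P < 2 := by
      rw [Int.ediv_lt_iff_lt_mul hP]
      linarith
    rw [hdiv]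
    omega
  rw [key, key, h]

-- bit k (k < 12) of d equals bit k of d % 4096
lemma pv_bit_mod12 (d : Int) (k : Nat) (hk : k < 12) : pvBit d k = pvBit (d % 4096) k := by
  unfold pvBit
  rw [PySem.Int.band_one, PySem.Int.band_one,
    PySem.Int.mod_eq_emod_of_pos (by norm_num : (0:Int) < 2),
    PySem.Int.mod_eq_emod_of_pos (by norm_num : (0:Int) < 2),
    Int.shiftRight_eq_div_pow, Int.shiftRight_eq_div_pow]
  push_cast
  apply pv_div_mod2_of_emod _ _ _ (by positivity)
  have hdvd : (2 * (2:Int)^k) ∣ 4096 := by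
    have hle : k + 1 ≤ 12 := by omega
    have h1 : (2:Int) * 2^k = 2^(k + 1) := by ring
    have h2 : (4096:Int) = 2^12 := by norm_num
    rw [h1, h2]
    exact pow_dvd_pow 2 hle
  exact (Int.emod_emod_of_dvd d hdvd).symm

-- the 12-bit parity of d is the parity of d % 4096
lemma pv_parity12_mod (d : Int) : pvParity12 d = pvParity12 (d % 4096) := by
  unfold pvParity12
  apply PySem.List.foldl_congr_mem
  intro acc b hbmem
  rw [PySem.List.mem_pyRange_one] at hbmem
  rw [pv_bit_mod12 d b.toNat (by omega)]

-- A's halving XOR fold of a 12-bit value, as one function (proof-side name for A's tail chain)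
def pvChain (v0 : Int) : Int :=
  let v := PySem.Int.bxor v0 (v0 >>> (8 : Nat))
  let v := PySem.Int.bxor v (v >>> (4 : Nat))
  let v := PySem.Int.bxor v (v >>> (2 : Nat))
  let v := PySem.Int.bxor v (v >>> (1 : Nat))
  PySem.Int.band v 1

-- Nat versions of the two tail computations, for a fast finite check
def pvChainN (m : Nat) : Nat :=
  let v := m ^^^ (m >>> 8)
  let v := v ^^^ (v >>> 4)
  let v := v ^^^ (v >>> 2)
  let v := v ^^^ (v >>> 1)
  v &&& 1

def pvParityN (m : Nat) : Nat :=
  (((((((((((0 ^^^ (m >>> 0 &&& 1)) ^^^ (m >>> 1 &&& 1)) ^^^ (m >>> 2 &&& 1)) ^^^ (m >>> 3 &&& 1))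
    ^^^ (m >>> 4 &&& 1)) ^^^ (m >>> 5 &&& 1)) ^^^ (m >>> 6 &&& 1)) ^^^ (m >>> 7 &&& 1))
    ^^^ (m >>> 8 &&& 1)) ^^^ (m >>> 9 &&& 1)) ^^^ (m >>> 10 &&& 1)) ^^^ (m >>> 11 &&& 1)

-- on the 4096 possible residues, A's halving fold and B's parity loop agree (finite check, in Nat)
set_option maxRecDepth 40000 in
set_option maxHeartbeats 1000000 in
lemma pv_chunkN : ∀ (a : Fin 8) (b : Fin 512),
    pvChainN (512*(a:Nat)+(b:Nat)) = pvParityN (512*(a:Nat)+(b:Nat)) := by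
  decide

lemma pv_shift_natCast (m k : Nat) : ((m : Int) >>> (k : Nat)) = ((m >>> k : Nat) : Int) := by
  first
    | exact Int.shiftRight_natCast m k
    | (cases k <;> rfl)
    | (cases m <;> cases k <;> rfl)
    | simp [Int.shiftRight_natCast]

lemma pv_band1_natCast (a : Nat) : PySem.Int.band ((a : Nat) : Int) 1 = ((a &&& 1 : Nat) : Int) := by
  rw [show (1:Int) = ((1:Nat) : Int) from rfl, PySem.Int.band_natCast]

lemma pvBit_natCast (m : Nat) (k : Nat) : pvBit ((m : Nat) : Int) k = ((m >>> k &&& 1 : Nat) : Int) := by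
  unfold pvBit
  rw [pv_shift_natCast m k, pv_band1_natCast]

lemma pv_chain_natCast (m : Nat) : pvChain ((m : Nat) : Int) = ((pvChainN m : Nat) : Int) := by
  simp only [pvChain, pvChainN]
  rw [pv_shift_natCast m 8, PySem.Int.bxor_natCast,
    pv_shift_natCast _ 4, PySem.Int.bxor_natCast,
    pv_shift_natCast _ 2, PySem.Int.bxor_natCast,
    pv_shift_natCast _ 1, PySem.Int.bxor_natCast,
    pv_band1_natCast]

lemma pv_parity_natCast (m : Nat) : pvParity12 ((m : Nat) : Int) = ((pvParityN m : Nat) : Int) := by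
  unfold pvParity12 pvParityN
  rw [show PySem.List.pyRange 0 12 = [0,1,2,3,4,5,6,7,8,9,10,11] from by decide]
  simp only [List.foldl, Int.toNat_zero, Int.toNat_one]
  rw [show Int.toNat 2 = 2 from rfl, show Int.toNat 3 = 3 from rfl,
    show Int.toNat 4 = 4 from rfl, show Int.toNat 5 = 5 from rfl,
    show Int.toNat 6 = 6 from rfl, show Int.toNat 7 = 7 from rfl,
    show Int.toNat 8 = 8 from rfl, show Int.toNat 9 = 9 from rfl,
    show Int.toNat 10 = 10 from rfl, show Int.toNat 11 = 11 from rfl]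
  rw [show (0:Int) = ((0:Nat) : Int) from rfl]
  rw [pvBit_natCast m 0, pvBit_natCast m 1, pvBit_natCast m 2, pvBit_natCast m 3,
    pvBit_natCast m 4, pvBit_natCast m 5, pvBit_natCast m 6, pvBit_natCast m 7,
    pvBit_natCast m 8, pvBit_natCast m 9, pvBit_natCast m 10, pvBit_natCast m 11]
  rw [PySem.Int.bxor_natCast, PySem.Int.bxor_natCast, PySem.Int.bxor_natCast,
    PySem.Int.bxor_natCast, PySem.Int.bxor_natCast, PySem.Int.bxor_natCast,
    PySem.Int.bxor_natCast, PySem.Int.bxor_natCast, PySem.Int.bxor_natCast,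
    PySem.Int.bxor_natCast, PySem.Int.bxor_natCast, PySem.Int.bxor_natCast]

lemma pv_fold_parity (m : Nat) (hm : m < 4096) :
    pvChain ((m : Nat) : Int) = pvParity12 ((m : Nat) : Int) := by
  rw [pv_chain_natCast, pv_parity_natCast]
  have h := pv_chunkN ⟨m / 512, by omega⟩ ⟨m % 512, by omega⟩
  rw [show 512 * (m / 512) + m % 512 = m from by omega] at h
  exact congrArg _ h

-- A's full tail equals B's full tail, for every accumulator value e
lemma pv_tail_eq (e : Int) :
    (let v := PySem.Int.band e 0xFFF
     let v := PySem.Int.bxor v (v >>> (8 : Nat))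
     let v := PySem.Int.bxor v (v >>> (4 : Nat))
     let v := PySem.Int.bxor v (v >>> (2 : Nat))
     let v := PySem.Int.bxor v (v >>> (1 : Nat))
     PySem.Int.bxor e (PySem.Int.band v 1 <<< (12 : Nat)))
    = PySem.Int.bxor e (pvParity12 e <<< (12 : Nat)) := by
  show PySem.Int.bxor e (pvChain (PySem.Int.band e 0xFFF) <<< (12 : Nat))
      = PySem.Int.bxor e (pvParity12 e <<< (12 : Nat))
  have hm0 : 0 ≤ e % 4096 := Int.emod_nonneg e (by norm_num)
  have hmlt : e % 4096 < 4096 := Int.emod_lt_of_pos e (by norm_num)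
  have hcast : (((e % 4096).toNat : Nat) : Int) = e % 4096 := by omega
  have hfin := pv_fold_parity (e % 4096).toNat (by omega)
  rw [hcast] at hfin
  rw [pv_band_mask12 e, pv_parity12_mod e, hfin]

-- ===== VERDICT (by name: the statement is the Claim_ definition above) =====
theorem icap_ecc_spec : Claim_equal_icap_ecc := by
  intro idx data ecc _
  show icap_ecc idx data ecc = icap_ecc_alt idx data ecc
  simp only [icap_ecc, icap_ecc_alt, pvWord]
  rw [pv_off_eq idx]
  split_ifs
  all_goals rw [pv_loop_eq]
  all_goals first
    | rfl
    | exact pv_tail_eq _
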